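-- pv_equiv track=rewrite | github.com/hendrowarsito/Cek-Laporan-6 | Ceklaporan6.py | pages_to_text
-- ===== SOURCE A (Python) =====
-- MAX_CHARS  = 40000
--
-- def pages_to_text(pages: list, max_chars: int = MAX_CHARS) -> str:
--     parts, total = [], 0
--     for i, page in enumerate(pages, 1):
--         chunk = f"\n--- Halaman {i} ---\n{page}"
--         if total + len(chunk) > max_chars:
--             parts.append("\n\n[... konten dipotong karena terlalu panjang ...]")
--             break
--         parts.append(chunk)
--         total += len(chunk)
--     return "".join(parts)
-- ===== SOURCE B (Python) =====
-- MAX_CHARS = 40000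
-- _HEAD = 18  # len("\n--- Halaman ") + len(" ---\n")
--
-- def pages_to_text(pages: list, max_chars: int = MAX_CHARS) -> str:
--     # Phase 1: arithmetic-only measurement. A chunk for page i has length
--     # 18 + len(str(i)) + len(page); decide how many pages fit without
--     # building a single chunk string.
--     keep, budget, truncated = 0, max_chars, False
--     for i, page in enumerate(pages, 1):
--         c = _HEAD + len(str(i)) + len(page)
--         if c > budget:
--             truncated = True
--             break
--         budget -= c
--         keep += 1
--     # Phase 2: render exactly the kept pages.
--     text = "".join(f"\n--- Halaman {i} ---\n{p}" for i, p in enumerate(pages[:keep], 1))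
--     if truncated:
--         text += "\n\n[... konten dipotong karena terlalu panjang ...]"
--     return text
-- ===== Notes on version B (the rewrite author's own statement) =====
-- stated objective: alternative
-- what changed: Replaces A's single loop that interleaves formatting, length accounting and output collection by two separate phases: a measurement pass that works purely on arithmetic (chunk length = 18 + digits(i) + len(page), no chunk string is ever built) to compute how many pages fit and whether the marker is needed, then a render pass that formats exactly those pages.
import Mathlib
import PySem

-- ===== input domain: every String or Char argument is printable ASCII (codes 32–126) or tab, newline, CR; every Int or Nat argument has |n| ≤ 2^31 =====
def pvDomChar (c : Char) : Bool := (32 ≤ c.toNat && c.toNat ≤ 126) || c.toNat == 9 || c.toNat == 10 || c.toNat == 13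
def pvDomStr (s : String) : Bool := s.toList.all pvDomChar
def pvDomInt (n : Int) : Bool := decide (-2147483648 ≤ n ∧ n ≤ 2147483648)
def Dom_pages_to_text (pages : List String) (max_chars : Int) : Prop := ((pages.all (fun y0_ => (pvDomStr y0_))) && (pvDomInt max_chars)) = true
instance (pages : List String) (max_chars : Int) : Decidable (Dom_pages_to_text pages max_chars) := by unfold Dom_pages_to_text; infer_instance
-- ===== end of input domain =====

-- B splits A's single format-measure-collect loop into an arithmetic-only measurement pass (no chunk strings built) followed by a render pass over the kept pages; same values, no speed claim.

-- ===== PORT A =====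
def pvMarker : String := "\n\n[... konten dipotong karena terlalu panjang ...]"

def pvChunk (i : Int) (p : String) : String :=
  "\n--- Halaman " ++ PySem.Int.toStr i ++ " ---\n" ++ p

-- A's loop: parts accumulated until a chunk would overflow, then the marker and break
def pvALoop : List String → Int → Int → Int → List String
  | [], _, _, _ => []
  | p :: rest, i, total, mc =>
    let chunk := pvChunk i p
    if total + PySem.Str.len chunk > mc then [pvMarker]
    else chunk :: pvALoop rest (i + 1) (total + PySem.Str.len chunk) mc

def pages_to_text (pages : List String) (max_chars : Int) : String :=
  PySem.Str.join "" (pvALoop pages 1 0 max_chars)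

-- ===== PORT B =====
-- Phase 1 (Source B's measurement loop): purely arithmetic, returns (keep, truncated).
-- The chunk for page i has length 18 + len(str(i)) + len(page).
def pvMeasure : List String → Int → Int → Nat × Bool
  | [], _, _ => (0, false)
  | p :: rest, i, budget =>
    let c := 18 + PySem.Str.len (PySem.Int.toStr i) + PySem.Str.len p
    if c > budget then (0, true)
    else
      let r := pvMeasure rest (i + 1) (budget - c)
      (r.1 + 1, r.2)

-- Phase 2 (Source B's render): format exactly the kept pages.  pages[:keep] with keep ≥ 0
-- and keep ≤ len(pages) is List.take keep (exact here).
def pvRender (pages : List String) (start : Int) : String :=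
  PySem.Str.join "" ((PySem.List.enumerate pages start).map (fun q => pvChunk q.1 q.2))

def pages_to_text_alt (pages : List String) (max_chars : Int) : String :=
  let r := pvMeasure pages 1 max_chars
  let text := pvRender (pages.take r.1) 1
  if r.2 then text ++ pvMarker else text

-- ===== PRECONDITION & SPEC =====
def Spec_pages_to_text (pages : List String) (max_chars : Int) (out : String) : Prop := out = pages_to_text_alt pages max_chars
instance (pages : List String) (max_chars : Int) (out : String) : Decidable (Spec_pages_to_text pages max_chars out) := by unfold Spec_pages_to_text; infer_instance

-- ===== CLAIM (what is proved, stated in full; the proofs are below) =====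
def Claim_equal_pages_to_text : Prop := ∀ (pages : List String) (max_chars : Int), Dom_pages_to_text pages max_chars → Spec_pages_to_text pages max_chars (pages_to_text pages max_chars)

-- ===== LEMMAS AND PROOFS =====

lemma pv_intercalate_nil_cons (cs : List Char) (ds : List (List Char)) :
    ([] : List Char).intercalate (cs :: ds) = cs ++ ([] : List Char).intercalate ds := by
  cases ds <;> simp [List.intercalate]

lemma pv_join_cons (c : String) (cs : List String) :
    PySem.Str.join "" (c :: cs) = c ++ PySem.Str.join "" cs := by
  simp only [PySem.Str.join, PySem.Chars.join, String.toList_empty, List.map_cons,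
    pv_intercalate_nil_cons, String.ofList_append, String.ofList_toList]

lemma pv_len_chunk (i : Int) (p : String) :
    PySem.Str.len (pvChunk i p) = 18 + PySem.Str.len (PySem.Int.toStr i) + PySem.Str.len p := by
  simp [pvChunk, PySem.Str.len, String.toList_append]
  omega

lemma pv_key (pages : List String) (i total mc : Int) :
    PySem.Str.join "" (pvALoop pages i total mc) =
      (let r := pvMeasure pages i (mc - total)
       let text := pvRender (pages.take r.1) i
       if r.2 then text ++ pvMarker else text) := by
  induction pages generalizing i total with
  | nil => simp [pvALoop, pvMeasure, pvRender, PySem.List.enumerate_nil, PySem.Str.join]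
  | cons p rest ih =>
    simp only [pvALoop, pvMeasure]
    have hc : total + PySem.Str.len (pvChunk i p) > mc ↔
        18 + PySem.Str.len (PySem.Int.toStr i) + PySem.Str.len p > mc - total := by
      rw [pv_len_chunk]; omega
    by_cases h : 18 + PySem.Str.len (PySem.Int.toStr i) + PySem.Str.len p > mc - total
    · rw [if_pos (hc.mpr h), if_pos h]
      simp [pvRender, PySem.List.enumerate_nil, PySem.Str.join]
    · rw [if_neg (fun hh => h (hc.mp hh)), if_neg h]
      rw [pv_join_cons, ih (i + 1) (total + PySem.Str.len (pvChunk i p))]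
      have hbud : mc - (total + PySem.Str.len (pvChunk i p)) =
          mc - total - (18 + PySem.Str.len (PySem.Int.toStr i) + PySem.Str.len p) := by
        rw [pv_len_chunk]; omega
      rw [hbud]
      cases hm : pvMeasure rest (i + 1)
          (mc - total - (18 + PySem.Str.len (PySem.Int.toStr i) + PySem.Str.len p)) with
      | mk k tr =>
        simp only [List.take_succ_cons, pvRender, PySem.List.enumerate_cons, List.map_cons,
          pv_join_cons]
        cases tr <;> simp [String.append_assoc]

-- ===== VERDICT (by name: the statement is the Claim_ definition above) =====
theorem pages_to_text_spec : Claim_equal_pages_to_text := by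
  intro pages mc _
  unfold Spec_pages_to_text pages_to_text pages_to_text_alt
  have := pv_key pages 1 0 mc
  simpa using this
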